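-- pv_equiv track=rewrite | github.com/kristopher-miles/threadspeak-audiobook | app/api/shared.py | _upsert_manifest_entries
-- ===== SOURCE A (Python) =====
-- def _upsert_manifest_entries(existing_entries, incoming_entries):
--     merged = []
--     index_by_key = {}
--
--     def entry_key(entry):
--         if not isinstance(entry, dict):
--             return None
--         for field in ("id", "filename", "name", "speaker"):
--             value = str(entry.get(field) or "").strip()
--             if value:
--                 return f"{field}:{value}"
--         return None
--
--     for entry in list(existing_entries or []):
--         if not isinstance(entry, dict):
--             continue
--         key = entry_key(entry)
--         if key is None or key not in index_by_key:
--             index_by_key[key] = len(merged)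
--             merged.append(dict(entry))
--
--     for entry in list(incoming_entries or []):
--         if not isinstance(entry, dict):
--             continue
--         key = entry_key(entry)
--         if key is not None and key in index_by_key:
--             merged[index_by_key[key]] = dict(entry)
--             continue
--         index_by_key[key] = len(merged)
--         merged.append(dict(entry))
--     return merged
-- ===== SOURCE B (Python) =====
-- def _upsert_manifest_entries(existing_entries, incoming_entries):
--     def entry_key(entry):
--         if not isinstance(entry, dict):
--             return None
--         for field in ("id", "filename", "name", "speaker"):
--             value = str(entry.get(field) or "").strip()
--             if value:
--                 return f"{field}:{value}"
--         return None
--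
--     existing = [e for e in (existing_entries or []) if isinstance(e, dict)]
--     incoming = [e for e in (incoming_entries or []) if isinstance(e, dict)]
--
--     def last_incoming(key):
--         # the last incoming entry whose key is `key`, if any
--         for entry in reversed(incoming):
--             if entry_key(entry) == key:
--                 return entry
--         return None
--
--     out = []
--     seen = set()
--     # body: each existing entry (keyless verbatim; keyed first-wins), already
--     # resolved to the LAST incoming entry with the same key when one exists
--     for entry in existing:
--         key = entry_key(entry)
--         if key is None:
--             out.append(dict(entry))
--         elif key not in seen:
--             seen.add(key)
--             repl = last_incoming(key)
--             out.append(dict(entry if repl is None else repl))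
--     # tail: keyless incoming verbatim; a genuinely new key is emitted once, at
--     # its first occurrence, resolved to the last incoming entry with that key
--     tail_seen = set()
--     for entry in incoming:
--         key = entry_key(entry)
--         if key is None:
--             out.append(dict(entry))
--         elif key not in seen and key not in tail_seen:
--             tail_seen.add(key)
--             repl = last_incoming(key)
--             out.append(dict(entry if repl is None else repl))
--     return out
-- ===== Notes on version B (the rewrite author's own statement) =====
-- stated objective: alternative
-- what changed: Replaces A's imperative upsert (a merged list mutated in place, driven by a key->position index map) by a declarative last-wins resolution: B never updates anything -- it emits the body (existing entries, keyless verbatim, keyed first-wins) and the tail (first occurrences of genuinely new incoming keys plus keyless incoming), computing each emitted entry directly as the last incoming entry with that key via a backward scan of incoming.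
import Mathlib
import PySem

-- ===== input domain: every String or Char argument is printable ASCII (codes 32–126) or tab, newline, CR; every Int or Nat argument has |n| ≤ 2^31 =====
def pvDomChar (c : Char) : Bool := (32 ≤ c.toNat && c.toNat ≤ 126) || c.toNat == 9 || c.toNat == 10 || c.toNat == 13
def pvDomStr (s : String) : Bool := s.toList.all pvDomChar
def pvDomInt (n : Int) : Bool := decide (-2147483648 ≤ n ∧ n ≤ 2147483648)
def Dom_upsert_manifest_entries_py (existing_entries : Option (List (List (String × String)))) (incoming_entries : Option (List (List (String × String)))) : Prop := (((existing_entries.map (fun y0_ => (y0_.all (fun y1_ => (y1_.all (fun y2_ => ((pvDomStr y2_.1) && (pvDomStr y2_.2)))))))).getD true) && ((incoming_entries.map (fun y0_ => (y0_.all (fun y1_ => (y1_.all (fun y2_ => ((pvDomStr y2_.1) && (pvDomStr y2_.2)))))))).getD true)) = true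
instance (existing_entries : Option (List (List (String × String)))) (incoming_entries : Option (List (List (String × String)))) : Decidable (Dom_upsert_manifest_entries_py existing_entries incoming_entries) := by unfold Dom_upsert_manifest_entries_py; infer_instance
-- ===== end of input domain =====

-- B replaces A's imperative upsert (merged list mutated in place via a key->position map) by a
-- declarative last-wins resolution: no state is ever updated, each emitted entry is computed
-- directly as the last incoming entry with its key (backward scan); objective: alternative.

-- entry_key: identical nested helper in both Python sources, ported once.
-- (`entry.get(field) or ""` on a str-valued dict: missing key and "" both give ""; str() is identity.)
def pyEntryKeyFields : List String → List (String × String) → Option String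
  | [], _ => none
  | f :: rest, e =>
      let v := PySem.Str.strip ((PySem.Dict.mk e).getD f "")
      if v = "" then pyEntryKeyFields rest e else some (f ++ ":" ++ v)

def pyEntryKey (e : List (String × String)) : Option String :=
  pyEntryKeyFields ["id", "filename", "name", "speaker"] e

-- ===== PORT A =====
-- state: (merged, index_by_key).  The `isinstance(entry, dict)` guards are vacuous under the
-- typed encoding (every entry IS a dict) and `dict(entry)` copies are identities.
-- `merged[index_by_key[key]] = dict(entry)`'s index is a stored list position, always in range,
-- so it is ported as List.set (Python's in-range item assignment).
def upsertA_exist_step (st : List (List (String × String)) × PySem.Dict (Option String) Nat)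
    (entry : List (String × String)) :
    List (List (String × String)) × PySem.Dict (Option String) Nat :=
  let key := pyEntryKey entry
  if key = none ∨ st.2.contains key = false then
    (st.1 ++ [entry], st.2.insert key st.1.length)
  else st

def upsertA_incoming_step (st : List (List (String × String)) × PySem.Dict (Option String) Nat)
    (entry : List (String × String)) :
    List (List (String × String)) × PySem.Dict (Option String) Nat :=
  let key := pyEntryKey entry
  if key ≠ none ∧ st.2.contains key = true then
    (st.1.set (st.2.getD key 0) entry, st.2)
  else
    (st.1 ++ [entry], st.2.insert key st.1.length)

def upsert_manifest_entries_py (existing_entries : Option (List (List (String × String)))) (incoming_entries : Option (List (List (String × String)))) : List (List (String × String)) :=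
  ((incoming_entries.getD []).foldl upsertA_incoming_step
    ((existing_entries.getD []).foldl upsertA_exist_step ([], PySem.Dict.empty))).1

-- ===== PORT B =====
-- Source B defines last_incoming(key): scan reversed(incoming), return the first entry whose key is `key`.
def lastIncoming (incoming : List (List (String × String))) (k : String) :
    Option (List (String × String)) :=
  incoming.reverse.find? (fun e => pyEntryKey e == some k)

-- body loop: state (out, seen); keyless entries verbatim, keyed first-wins resolved to last incoming
def upsertB_body_step (incoming : List (List (String × String)))
    (st : List (List (String × String)) × PySem.Set String) (entry : List (String × String)) :
    List (List (String × String)) × PySem.Set String :=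
  match pyEntryKey entry with
  | none => (st.1 ++ [entry], st.2)
  | some k =>
      if st.2.contains k = true then st
      else (st.1 ++ [(lastIncoming incoming k).getD entry], PySem.Set.add st.2 k)

-- tail loop: state (out, tail_seen); `seen` is pass 1's final set
def upsertB_tail_step (incoming : List (List (String × String))) (seen : PySem.Set String)
    (st : List (List (String × String)) × PySem.Set String) (entry : List (String × String)) :
    List (List (String × String)) × PySem.Set String :=
  match pyEntryKey entry with
  | none => (st.1 ++ [entry], st.2)
  | some k =>
      if seen.contains k = false ∧ st.2.contains k = false then
        (st.1 ++ [(lastIncoming incoming k).getD entry], PySem.Set.add st.2 k)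
      else st

-- (the `isinstance(entry, dict)` comprehension filters of Source B are vacuous under the typed encoding)
def upsert_manifest_entries_py_alt (existing_entries : Option (List (List (String × String)))) (incoming_entries : Option (List (List (String × String)))) : List (List (String × String)) :=
  let existing := existing_entries.getD []
  let incoming := incoming_entries.getD []
  let p1 := existing.foldl (upsertB_body_step incoming) ([], PySem.Set.empty)
  (incoming.foldl (upsertB_tail_step incoming p1.2) (p1.1, PySem.Set.empty)).1

-- ===== PRECONDITION & SPEC =====
def Spec_upsert_manifest_entries_py (existing_entries : Option (List (List (String × String)))) (incoming_entries : Option (List (List (String × String)))) (out : List (List (String × String))) : Prop := out = upsert_manifest_entries_py_alt existing_entries incoming_entries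
instance (existing_entries : Option (List (List (String × String)))) (incoming_entries : Option (List (List (String × String)))) (out : List (List (String × String))) : Decidable (Spec_upsert_manifest_entries_py existing_entries incoming_entries out) := by unfold Spec_upsert_manifest_entries_py; infer_instance

-- ===== CLAIM (what is proved, stated in full; the proofs are below) =====
def Claim_equal_upsert_manifest_entries_py : Prop := ∀ (existing_entries : Option (List (List (String × String)))) (incoming_entries : Option (List (List (String × String)))), Dom_upsert_manifest_entries_py existing_entries incoming_entries → Spec_upsert_manifest_entries_py existing_entries incoming_entries (upsert_manifest_entries_py existing_entries incoming_entries)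

-- ===== LEMMAS AND PROOFS =====

-- the (unique, if any) named key that index_by_key maps to position i
def keyForPos (ibk : PySem.Dict (Option String) Nat) (i : Nat) : Option String :=
  match ibk.items.find? (fun p => p.1.isSome && p.2 == i) with
  | some (some s, _) => some s
  | _ => none

-- the resolved value of a slot: the last incoming entry with the slot's key, else the default
def resolve (inc : List (List (String × String))) (ko : Option String)
    (e : List (String × String)) : List (String × String) :=
  match ko with
  | some k => (lastIncoming inc k).getD e
  | none => e

theorem resolve_none (inc : List (List (String × String))) (e : List (String × String)) :
    resolve inc none e = e := rfl

theorem resolve_some (inc : List (List (String × String))) (k : String)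
    (e : List (String × String)) : resolve inc (some k) e = (lastIncoming inc k).getD e := rfl

-- the body of A's final result, at offset i: each slot resolved by keyForPos
def bodyReplGo (inc : List (List (String × String))) (ibk : PySem.Dict (Option String) Nat) :
    Nat → List (List (String × String)) → List (List (String × String))
  | _, [] => []
  | i, e :: rest => resolve inc (keyForPos ibk i) e :: bodyReplGo inc ibk (i + 1) rest

def bodyRepl (inc m : List (List (String × String))) (ibk : PySem.Dict (Option String) Nat) :
    List (List (String × String)) :=
  bodyReplGo inc ibk 0 m

-- the tail of A's final result: keyless incoming verbatim, first occurrences of keys outside dom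
def tailRepl : List (List (String × String)) → (String → Bool) → List (List (String × String))
  | [], _ => []
  | e :: rest, dom =>
      match pyEntryKey e with
      | none => e :: tailRepl rest dom
      | some k =>
          if dom k then tailRepl rest dom
          else ((lastIncoming (e :: rest) k).getD e) :: tailRepl rest (fun k' => k' == k || dom k')

-- A-state invariant: unique keys, positions in range, distinct named keys at distinct positions
def InvA (m : List (List (String × String))) (ibk : PySem.Dict (Option String) Nat) : Prop :=
  ibk.keys.Nodup ∧
  (∀ s i, ibk.get? (some s) = some i → i < m.length) ∧
  (∀ s s' i, ibk.get? (some s) = some i → ibk.get? (some s') = some i → s = s')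

theorem lastIncoming_cons_of_ne (e : List (String × String)) (rest : List (List (String × String)))
    (k : String) (h : pyEntryKey e ≠ some k) :
    lastIncoming (e :: rest) k = lastIncoming rest k := by
  unfold lastIncoming
  rw [List.reverse_cons, List.find?_append]
  have hp : (pyEntryKey e == some k) = false := by simp [h]
  have h1 : ([e].find? (fun e => pyEntryKey e == some k)) = none := by simp [List.find?, hp]
  rw [h1, Option.or_none]

theorem lastIncoming_cons_self_getD (e : List (String × String))
    (rest : List (List (String × String))) (k : String) (hk : pyEntryKey e = some k)
    (x : List (String × String)) :
    (lastIncoming (e :: rest) k).getD x = (lastIncoming rest k).getD e := by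
  unfold lastIncoming
  rw [List.reverse_cons, List.find?_append]
  cases h : rest.reverse.find? (fun e => pyEntryKey e == some k) with
  | none => simp [List.find?, hk]
  | some r => simp

theorem keyForPos_some (ibk : PySem.Dict (Option String) Nat) (i : Nat) (k : String)
    (hnd : ibk.keys.Nodup) (h : keyForPos ibk i = some k) :
    ibk.get? (some k) = some i := by
  unfold keyForPos at h
  cases hf : ibk.items.find? (fun p => p.1.isSome && p.2 == i) with
  | none => rw [hf] at h; simp at h
  | some p =>
      rw [hf] at h
      have hmem := List.mem_of_find?_eq_some hf
      have hpred := List.find?_some hf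
      obtain ⟨pk, pv⟩ := p
      simp only [Bool.and_eq_true, beq_iff_eq] at hpred
      cases pk with
      | none => simp at hpred
      | some s =>
          simp only [Option.some.injEq] at h
          subst h
          rw [hpred.2] at hmem
          exact PySem.Dict.get?_of_mem_items _ hmem hnd

theorem keyForPos_of_get? (ibk : PySem.Dict (Option String) Nat) (i : Nat) (k : String)
    (hnd : ibk.keys.Nodup)
    (hinj : ∀ s s' i', ibk.get? (some s) = some i' → ibk.get? (some s') = some i' → s = s')
    (h : ibk.get? (some k) = some i) : keyForPos ibk i = some k := by
  have hmem : (some k, i) ∈ ibk.items := PySem.Dict.mem_items_of_get?_eq_some _ h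
  have hex : ∃ p ∈ ibk.items, (p.1.isSome && p.2 == i) = true := ⟨(some k, i), hmem, by simp⟩
  obtain ⟨p, hp⟩ := Option.isSome_iff_exists.mp (List.find?_isSome.mpr hex)
  unfold keyForPos
  rw [hp]
  have hmem' := List.mem_of_find?_eq_some hp
  have hpred := List.find?_some hp
  obtain ⟨pk, pv⟩ := p
  simp only [Bool.and_eq_true, beq_iff_eq] at hpred
  cases pk with
  | none => simp at hpred
  | some s =>
      have hget : ibk.get? (some s) = some i := by
        rw [hpred.2] at hmem'
        exact PySem.Dict.get?_of_mem_items _ hmem' hnd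
      rw [hinj s k i hget h]

-- keyForPos only returns keys contained in ibk
theorem keyForPos_contains (ibk : PySem.Dict (Option String) Nat) (i : Nat) (k : String)
    (hnd : ibk.keys.Nodup) (h : keyForPos ibk i = some k) : ibk.contains (some k) = true := by
  rw [PySem.Dict.contains_eq_isSome_get?, keyForPos_some ibk i k hnd h]
  rfl

-- inserting the key `none` never changes keyForPos
theorem keyForPos_insert_none (ibk : PySem.Dict (Option String) Nat) (v i : Nat) :
    keyForPos (ibk.insert none v) i = keyForPos ibk i := by
  unfold keyForPos
  rw [PySem.Dict.items_insert]
  by_cases hc : ibk.contains none = true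
  · rw [if_pos hc]
    have : ∀ (l : List (Option String × Nat)),
        (l.map (fun p => if p.1 == none then (none, v) else p)).find?
            (fun p => p.1.isSome && p.2 == i)
          = l.find? (fun p => p.1.isSome && p.2 == i) := by
      intro l
      induction l with
      | nil => rfl
      | cons p t ih =>
          obtain ⟨pk, pv⟩ := p
          cases pk with
          | none =>
              rw [List.map_cons, List.find?_cons_of_neg (by simp),
                List.find?_cons_of_neg (by simp), ih]
          | some s =>
              rw [List.map_cons]
              by_cases hi : (pv == i) = true
              · rw [List.find?_cons_of_pos (by simp [hi]), List.find?_cons_of_pos (by simp [hi])]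
                simp
              · rw [List.find?_cons_of_neg (by simp [hi]), List.find?_cons_of_neg (by simp [hi]), ih]
    rw [this]
  · rw [if_neg hc, List.find?_append]
    have h1 : ([((none : Option String), v)].find? (fun p => p.1.isSome && p.2 == i)) = none := by
      simp [List.find?]
    rw [h1, Option.or_none]

-- inserting a fresh named key at a fresh position: old positions unchanged
theorem keyForPos_insert_fresh_lt (ibk : PySem.Dict (Option String) Nat) (k : String) (v i : Nat)
    (hc : ibk.contains (some k) = false) (hne : i ≠ v) :
    keyForPos (ibk.insert (some k) v) i = keyForPos ibk i := by
  unfold keyForPos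
  rw [PySem.Dict.items_insert_of_not_contains _ _ hc, List.find?_append]
  have h1 : ([((some k : Option String), v)].find? (fun p => p.1.isSome && p.2 == i)) = none := by
    have : (v == i) = false := by simp; omega
    simp [List.find?, this]
  rw [h1, Option.or_none]

theorem keyForPos_insert_fresh_self (ibk : PySem.Dict (Option String) Nat) (k : String) (v : Nat)
    (hc : ibk.contains (some k) = false)
    (hbound : ∀ s i, ibk.get? (some s) = some i → i < v) (hnd : ibk.keys.Nodup) :
    keyForPos (ibk.insert (some k) v) v = some k := by
  unfold keyForPos
  rw [PySem.Dict.items_insert_of_not_contains _ _ hc, List.find?_append]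
  have hnone : ibk.items.find? (fun p => p.1.isSome && p.2 == v) = none := by
    rw [List.find?_eq_none]
    intro p hp
    obtain ⟨pk, pv⟩ := p
    cases pk with
    | none => simp
    | some s =>
        have := hbound s pv (PySem.Dict.get?_of_mem_items _ hp hnd)
        simp [Nat.ne_of_lt this]
  rw [hnone, Option.none_or]
  simp [List.find?]

theorem length_bodyReplGo (inc : List (List (String × String)))
    (ibk : PySem.Dict (Option String) Nat) (i : Nat) (m : List (List (String × String))) :
    (bodyReplGo inc ibk i m).length = m.length := by
  induction m generalizing i with
  | nil => rfl
  | cons e rest ih => simp [bodyReplGo, ih]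

theorem getElem_bodyReplGo (inc : List (List (String × String)))
    (ibk : PySem.Dict (Option String) Nat) (i : Nat) (m : List (List (String × String)))
    (j : Nat) (h : j < m.length) :
    (bodyReplGo inc ibk i m)[j]'(by rw [length_bodyReplGo]; exact h) =
      resolve inc (keyForPos ibk (i + j)) (m[j]'h) := by
  induction m generalizing i j with
  | nil => simp at h
  | cons e rest ih =>
      cases j with
      | zero => simp [bodyReplGo]
      | succ j' =>
          have h' : j' < rest.length := by simpa using h
          have := ih (i + 1) j' h'
          simp only [bodyReplGo, List.getElem_cons_succ]
          rw [this]
          have : i + 1 + j' = i + (j' + 1) := by omega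
          rw [this]

theorem lastIncoming_nil (k : String) : lastIncoming [] k = none := rfl

theorem bodyRepl_nil (m : List (List (String × String))) (ibk : PySem.Dict (Option String) Nat) :
    bodyRepl [] m ibk = m := by
  unfold bodyRepl
  apply List.ext_getElem (by rw [length_bodyReplGo])
  intro j h1 h2
  rw [getElem_bodyReplGo [] ibk 0 m j h2]
  cases keyForPos ibk (0 + j) with
  | none => rw [resolve_none]
  | some k => rw [resolve_some, lastIncoming_nil]; rfl

theorem set_add_contains (s : PySem.Set String) (k k' : String) :
    PySem.Set.contains (PySem.Set.add s k) k' = (k' == k || PySem.Set.contains s k') := by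
  rw [Bool.eq_iff_iff, PySem.Set.contains_iff, PySem.Set.mem_add, Bool.or_eq_true, beq_iff_eq,
    PySem.Set.contains_iff]
  tauto

-- positions outside the domain of keyForPos: changing the head of the incoming list is invisible
theorem bodyRepl_cons_inc (e : List (String × String)) (rest m : List (List (String × String)))
    (ibk : PySem.Dict (Option String) Nat)
    (h : ∀ j k', keyForPos ibk j = some k' → pyEntryKey e ≠ some k') :
    bodyRepl (e :: rest) m ibk = bodyRepl rest m ibk := by
  unfold bodyRepl
  apply List.ext_getElem (by rw [length_bodyReplGo, length_bodyReplGo])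
  intro j h1 h2
  rw [length_bodyReplGo] at h1
  rw [getElem_bodyReplGo _ _ _ _ _ h1, getElem_bodyReplGo _ _ _ _ _ h1]
  cases hkp : keyForPos ibk (0 + j) with
  | none => rw [resolve_none, resolve_none]
  | some k' =>
      rw [resolve_some, resolve_some, lastIncoming_cons_of_ne e rest k' (h (0 + j) k' hkp)]

-- appending a keyless entry (index_by_key gains `none ↦ |m|`)
theorem bodyRepl_append_none (inc m : List (List (String × String)))
    (ibk : PySem.Dict (Option String) Nat) (e : List (String × String))
    (hnd : ibk.keys.Nodup) (hbound : ∀ s i, ibk.get? (some s) = some i → i < m.length) :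
    bodyRepl inc (m ++ [e]) (ibk.insert none m.length) = bodyRepl inc m ibk ++ [e] := by
  unfold bodyRepl
  apply List.ext_getElem (by simp [length_bodyReplGo])
  intro j h1 h2
  rw [length_bodyReplGo] at h1
  simp only [List.length_append, List.length_singleton] at h1
  rw [getElem_bodyReplGo _ _ _ _ _ (by simpa using h1)]
  rw [keyForPos_insert_none]
  rcases Nat.lt_or_ge j m.length with hj | hj
  · have hget : (m ++ [e])[j]'(by simp; omega) = m[j]'hj := List.getElem_append_left hj
    have hr : (bodyReplGo inc ibk 0 m ++ [e])[j]'h2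
        = (bodyReplGo inc ibk 0 m)[j]'(by rw [length_bodyReplGo]; exact hj) :=
      List.getElem_append_left (by rw [length_bodyReplGo]; exact hj)
    rw [hr, getElem_bodyReplGo _ _ _ _ _ hj, hget]
  · have hjm : j = m.length := by omega
    subst hjm
    have hkp : keyForPos ibk (0 + m.length) = none := by
      cases hq : keyForPos ibk (0 + m.length) with
      | none => rfl
      | some s =>
          have := hbound s _ (keyForPos_some ibk _ s hnd hq)
          omega
    rw [hkp, resolve_none]
    have hget : (m ++ [e])[m.length]'(by simp) = e := by
      simp
    have hr : (bodyReplGo inc ibk 0 m ++ [e])[m.length]'h2 = e := by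
      rw [List.getElem_append_right (by rw [length_bodyReplGo])]
      simp [length_bodyReplGo]
    rw [hget, hr]

-- appending an entry under a fresh named key (index_by_key gains `some k ↦ |m|`)
theorem bodyRepl_append_named (inc m : List (List (String × String)))
    (ibk : PySem.Dict (Option String) Nat) (e : List (String × String)) (k : String)
    (hc : ibk.contains (some k) = false)
    (hnd : ibk.keys.Nodup) (hbound : ∀ s i, ibk.get? (some s) = some i → i < m.length) :
    bodyRepl inc (m ++ [e]) (ibk.insert (some k) m.length)
      = bodyRepl inc m ibk ++ [(lastIncoming inc k).getD e] := by
  unfold bodyRepl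
  apply List.ext_getElem (by simp [length_bodyReplGo])
  intro j h1 h2
  rw [length_bodyReplGo] at h1
  simp only [List.length_append, List.length_singleton] at h1
  rw [getElem_bodyReplGo _ _ _ _ _ (by simpa using h1)]
  rcases Nat.lt_or_ge j m.length with hj | hj
  · rw [keyForPos_insert_fresh_lt _ _ _ _ hc (by omega)]
    have hget : (m ++ [e])[j]'(by simp; omega) = m[j]'hj := List.getElem_append_left hj
    have hr : (bodyReplGo inc ibk 0 m ++ [(lastIncoming inc k).getD e])[j]'h2
        = (bodyReplGo inc ibk 0 m)[j]'(by rw [length_bodyReplGo]; exact hj) :=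
      List.getElem_append_left (by rw [length_bodyReplGo]; exact hj)
    rw [hr, getElem_bodyReplGo _ _ _ _ _ hj, hget]
  · have hjm : j = m.length := by omega
    subst hjm
    have hkp : keyForPos (ibk.insert (some k) m.length) (0 + m.length) = some k := by
      rw [Nat.zero_add]
      exact keyForPos_insert_fresh_self ibk k m.length hc hbound hnd
    rw [hkp, resolve_some]
    have hget : (m ++ [e])[m.length]'(by simp) = e := by simp
    have hr : (bodyReplGo inc ibk 0 m ++ [(lastIncoming inc k).getD e])[m.length]'h2
        = (lastIncoming inc k).getD e := by
      rw [List.getElem_append_right (by rw [length_bodyReplGo])]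
      simp [length_bodyReplGo]
    rw [hget, hr]

-- an in-place replacement at the position of key k = consuming the head of the incoming list
theorem bodyRepl_set (e : List (String × String)) (rest m : List (List (String × String)))
    (ibk : PySem.Dict (Option String) Nat) (k : String) (pos : Nat)
    (hk : pyEntryKey e = some k) (hnd : ibk.keys.Nodup)
    (hinj : ∀ s s' i', ibk.get? (some s) = some i' → ibk.get? (some s') = some i' → s = s')
    (hpos : ibk.get? (some k) = some pos) (hlt : pos < m.length) :
    bodyRepl (e :: rest) m ibk = bodyRepl rest (m.set pos e) ibk := by
  unfold bodyRepl
  apply List.ext_getElem (by simp [length_bodyReplGo])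
  intro j h1 h2
  rw [length_bodyReplGo] at h1
  rw [getElem_bodyReplGo _ _ _ _ _ h1, getElem_bodyReplGo _ _ _ _ _ (by simpa using h1)]
  by_cases hjp : j = pos
  · subst hjp
    have hkp : keyForPos ibk (0 + j) = some k := by
      rw [Nat.zero_add]
      exact keyForPos_of_get? ibk j k hnd hinj hpos
    rw [hkp, resolve_some, resolve_some]
    have hset : (m.set j e)[j]'(by simpa using h1) = e := List.getElem_set_self _
    rw [hset, lastIncoming_cons_self_getD e rest k hk]
  · cases hkp : keyForPos ibk (0 + j) with
    | none =>
        rw [resolve_none, resolve_none, List.getElem_set_ne (by omega)]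
    | some k' =>
        have hne : k' ≠ k := by
          intro hq
          subst hq
          have h3 := keyForPos_some ibk (0 + j) k' hnd hkp
          rw [h3] at hpos
          have h4 := Option.some.inj hpos
          omega
        rw [resolve_some, resolve_some,
          lastIncoming_cons_of_ne e rest k' (by rw [hk]; exact fun hq => hne (Option.some.inj hq).symm),
          List.getElem_set_ne (by omega)]

-- unfolding lemmas for tailRepl
theorem tailRepl_cons_none (e : List (String × String)) (rest : List (List (String × String)))
    (dom : String → Bool) (hk : pyEntryKey e = none) :
    tailRepl (e :: rest) dom = e :: tailRepl rest dom := by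
  simp only [tailRepl, hk]

theorem tailRepl_cons_mem (e : List (String × String)) (rest : List (List (String × String)))
    (dom : String → Bool) (k : String) (hk : pyEntryKey e = some k) (hd : dom k = true) :
    tailRepl (e :: rest) dom = tailRepl rest dom := by
  simp only [tailRepl, hk, hd, if_true]

theorem tailRepl_cons_fresh (e : List (String × String)) (rest : List (List (String × String)))
    (dom : String → Bool) (k : String) (hk : pyEntryKey e = some k) (hd : dom k = false) :
    tailRepl (e :: rest) dom
      = (lastIncoming (e :: rest) k).getD e :: tailRepl rest (fun k' => k' == k || dom k') := by
  simp only [tailRepl, hk, hd]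
  rfl

theorem set_contains_true_mem (s : PySem.Set String) (x : String)
    (h : PySem.Set.contains s x = true) : x ∈ s := (PySem.Set.contains_iff s x).mp h

-- InvA maintenance
theorem invA_insert_none (m : List (List (String × String)))
    (ibk : PySem.Dict (Option String) Nat) (e : List (String × String)) (h : InvA m ibk) :
    InvA (m ++ [e]) (ibk.insert none m.length) := by
  obtain ⟨hnd, hbound, hinj⟩ := h
  have hget : ∀ s, (ibk.insert none m.length).get? (some s) = ibk.get? (some s) := by
    intro s
    exact PySem.Dict.get?_insert_of_ne _ _ (by simp)
  refine ⟨PySem.Dict.nodup_keys_insert _ _ _ hnd, ?_, ?_⟩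
  · intro s i hi
    rw [hget] at hi
    have := hbound s i hi
    simp only [List.length_append, List.length_singleton]
    omega
  · intro s s' i hs hs'
    rw [hget] at hs hs'
    exact hinj s s' i hs hs'

theorem invA_insert_named (m : List (List (String × String)))
    (ibk : PySem.Dict (Option String) Nat) (e : List (String × String)) (k : String)
    (hc : ibk.contains (some k) = false) (h : InvA m ibk) :
    InvA (m ++ [e]) (ibk.insert (some k) m.length) := by
  obtain ⟨hnd, hbound, hinj⟩ := h
  have hget : ∀ s, (ibk.insert (some k) m.length).get? (some s)
      = if s = k then some m.length else ibk.get? (some s) := by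
    intro s
    by_cases hs : s = k
    · subst hs
      rw [if_pos rfl, PySem.Dict.get?_insert_self]
    · rw [if_neg hs]
      exact PySem.Dict.get?_insert_of_ne _ _ (by simp [hs])
  refine ⟨PySem.Dict.nodup_keys_insert _ _ _ hnd, ?_, ?_⟩
  · intro s i hi
    rw [hget] at hi
    simp only [List.length_append, List.length_singleton]
    by_cases hs : s = k
    · rw [if_pos hs] at hi
      have := Option.some.inj hi
      omega
    · rw [if_neg hs] at hi
      have := hbound s i hi
      omega
  · intro s s' i hs hs'
    rw [hget] at hs hs'
    by_cases h1 : s = k <;> by_cases h2 : s' = k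
    · rw [h1, h2]
    · rw [if_pos h1] at hs
      rw [if_neg h2] at hs'
      have := hbound s' i hs'
      have := Option.some.inj hs
      omega
    · rw [if_neg h1] at hs
      rw [if_pos h2] at hs'
      have := hbound s i hs
      have := Option.some.inj hs'
      omega
    · rw [if_neg h1] at hs
      rw [if_neg h2] at hs'
      exact hinj s s' i hs hs'

theorem invA_set (m : List (List (String × String))) (ibk : PySem.Dict (Option String) Nat)
    (pos : Nat) (e : List (String × String)) (h : InvA m ibk) : InvA (m.set pos e) ibk := by
  obtain ⟨hnd, hbound, hinj⟩ := h
  exact ⟨hnd, fun s i hi => by rw [List.length_set]; exact hbound s i hi, hinj⟩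

-- characterization of A's incoming loop: body replacements ++ appended tail
theorem incChar (suffix : List (List (String × String))) :
    ∀ (m : List (List (String × String))) (ibk : PySem.Dict (Option String) Nat), InvA m ibk →
    (suffix.foldl upsertA_incoming_step (m, ibk)).1
      = bodyRepl suffix m ibk ++ tailRepl suffix (fun k => ibk.contains (some k)) := by
  induction suffix with
  | nil => intro m ibk _; rw [bodyRepl_nil]; simp [tailRepl]
  | cons e rest ih =>
      intro m ibk hinv
      obtain ⟨hnd, hbound, hinj⟩ := hinv
      rw [List.foldl_cons]
      cases hk : pyEntryKey e with
      | none =>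
          have hfresh : ∀ j k', keyForPos ibk j = some k' → pyEntryKey e ≠ some k' := by
            intro j k' _ hq
            rw [hk] at hq
            cases hq
          have hstep : upsertA_incoming_step (m, ibk) e
              = (m ++ [e], ibk.insert none m.length) := by
            unfold upsertA_incoming_step
            rw [hk]
            rw [if_neg (by intro hq; exact hq.1 rfl)]
          rw [hstep, ih _ _ (invA_insert_none m ibk e ⟨hnd, hbound, hinj⟩)]
          have hdom : (fun k => (ibk.insert none m.length).contains (some k))
              = (fun k => ibk.contains (some k)) := by
            funext k
            rw [PySem.Dict.contains_insert]
            simp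
          rw [hdom, bodyRepl_append_none rest m ibk e hnd hbound,
            tailRepl_cons_none e rest _ hk, bodyRepl_cons_inc e rest m ibk hfresh,
            List.append_assoc, List.singleton_append]
      | some k =>
          by_cases hc : ibk.contains (some k) = true
          · obtain ⟨pos, hpos⟩ : ∃ pos, ibk.get? (some k) = some pos := by
              have h5 := hc
              rw [PySem.Dict.contains_eq_isSome_get?] at h5
              exact Option.isSome_iff_exists.mp h5
            have hgetD : ibk.getD (some k) 0 = pos := by
              rw [PySem.Dict.getD_eq_get?_getD, hpos]
              rfl
            have hstep : upsertA_incoming_step (m, ibk) e = (m.set pos e, ibk) := by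
              unfold upsertA_incoming_step
              rw [hk]
              rw [if_pos ⟨by simp, hc⟩, hgetD]
            rw [hstep, ih _ _ (invA_set m ibk pos e ⟨hnd, hbound, hinj⟩),
              ← bodyRepl_set e rest m ibk k pos hk hnd hinj hpos (hbound k pos hpos),
              tailRepl_cons_mem e rest _ k hk hc]
          · have hcf : ibk.contains (some k) = false := by
              cases hq : ibk.contains (some k) with
              | false => rfl
              | true => exact absurd hq hc
            have hfresh : ∀ j k', keyForPos ibk j = some k' → pyEntryKey e ≠ some k' := by
              intro j k' hkp hq
              rw [hk] at hq
              have h6 := keyForPos_contains ibk j k' hnd hkp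
              rw [Option.some.inj hq] at hcf
              rw [hcf] at h6
              exact Bool.false_ne_true h6
            have hstep : upsertA_incoming_step (m, ibk) e
                = (m ++ [e], ibk.insert (some k) m.length) := by
              unfold upsertA_incoming_step
              rw [hk]
              rw [if_neg (by intro hq; rw [hcf] at hq; exact Bool.false_ne_true hq.2)]
            rw [hstep, ih _ _ (invA_insert_named m ibk e k hcf ⟨hnd, hbound, hinj⟩)]
            have hdom : (fun k' => (ibk.insert (some k) m.length).contains (some k'))
                = (fun k' => k' == k || ibk.contains (some k')) := by
              funext k'
              rw [PySem.Dict.contains_insert]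
              simp
            rw [hdom, bodyRepl_append_named rest m ibk e k hcf hnd hbound,
              tailRepl_cons_fresh e rest _ k hk hcf,
              lastIncoming_cons_self_getD e rest k hk,
              bodyRepl_cons_inc e rest m ibk hfresh,
              List.append_assoc, List.singleton_append]

-- coupling of the two first passes: B's out is bodyRepl of A's merged, B's seen is A's named keys
theorem existChar (ex inc : List (List (String × String))) :
    ∀ (m : List (List (String × String))) (ibk : PySem.Dict (Option String) Nat)
      (out : List (List (String × String))) (seen : PySem.Set String),
    InvA m ibk → out = bodyRepl inc m ibk →
    (∀ k, PySem.Set.contains seen k = ibk.contains (some k)) →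
    InvA (ex.foldl upsertA_exist_step (m, ibk)).1 (ex.foldl upsertA_exist_step (m, ibk)).2 ∧
    (ex.foldl (upsertB_body_step inc) (out, seen)).1
      = bodyRepl inc (ex.foldl upsertA_exist_step (m, ibk)).1 (ex.foldl upsertA_exist_step (m, ibk)).2 ∧
    (∀ k, PySem.Set.contains (ex.foldl (upsertB_body_step inc) (out, seen)).2 k
      = (ex.foldl upsertA_exist_step (m, ibk)).2.contains (some k)) := by
  induction ex with
  | nil => intro m ibk out seen hinv hout hseen; exact ⟨hinv, hout, hseen⟩
  | cons e rest ih =>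
      intro m ibk out seen hinv hout hseen
      obtain ⟨hnd, hbound, hinj⟩ := hinv
      rw [List.foldl_cons, List.foldl_cons]
      cases hk : pyEntryKey e with
      | none =>
          have hstepA : upsertA_exist_step (m, ibk) e = (m ++ [e], ibk.insert none m.length) := by
            unfold upsertA_exist_step
            rw [hk]
            rw [if_pos (Or.inl rfl)]
          have hstepB : upsertB_body_step inc (out, seen) e = (out ++ [e], seen) := by
            unfold upsertB_body_step
            rw [hk]
          rw [hstepA, hstepB]
          apply ih
          · exact invA_insert_none m ibk e ⟨hnd, hbound, hinj⟩
          · rw [hout, bodyRepl_append_none inc m ibk e hnd hbound]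
          · intro k
            rw [PySem.Dict.contains_insert, hseen k]
            simp
      | some k =>
          by_cases hc : ibk.contains (some k) = true
          · have hstepA : upsertA_exist_step (m, ibk) e = (m, ibk) := by
              unfold upsertA_exist_step
              rw [hk]
              rw [if_neg (by
                intro hq
                rcases hq with hq | hq
                · cases hq
                · rw [hc] at hq; exact Bool.noConfusion hq)]
            have hstepB : upsertB_body_step inc (out, seen) e = (out, seen) := by
              unfold upsertB_body_step
              rw [hk]
              dsimp only
              have h7 : PySem.Set.contains seen k = true := by rw [hseen k, hc]
              rw [if_pos h7]
            rw [hstepA, hstepB]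
            exact ih m ibk out seen ⟨hnd, hbound, hinj⟩ hout hseen
          · have hcf : ibk.contains (some k) = false := by
              cases hq : ibk.contains (some k) with
              | false => rfl
              | true => exact absurd hq hc
            have hstepA : upsertA_exist_step (m, ibk) e
                = (m ++ [e], ibk.insert (some k) m.length) := by
              unfold upsertA_exist_step
              rw [hk]
              rw [if_pos (Or.inr hcf)]
            have hstepB : upsertB_body_step inc (out, seen) e
                = (out ++ [(lastIncoming inc k).getD e], PySem.Set.add seen k) := by
              unfold upsertB_body_step
              rw [hk]
              dsimp only
              have h7 : PySem.Set.contains seen k = false := by rw [hseen k, hcf]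
              rw [if_neg (by rw [h7]; exact Bool.false_ne_true)]
            rw [hstepA, hstepB]
            apply ih
            · exact invA_insert_named m ibk e k hcf ⟨hnd, hbound, hinj⟩
            · rw [hout, bodyRepl_append_named inc m ibk e k hcf hnd hbound]
            · intro k'
              rw [set_add_contains, PySem.Dict.contains_insert, hseen k']
              simp

-- characterization of B's tail loop
theorem tailChar (inc : List (List (String × String))) (seen : PySem.Set String) :
    ∀ (suffix : List (List (String × String))) (out : List (List (String × String)))
      (ts : PySem.Set String),
    (∀ k, PySem.Set.contains seen k = false → PySem.Set.contains ts k = false →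
      lastIncoming inc k = lastIncoming suffix k) →
    (suffix.foldl (upsertB_tail_step inc seen) (out, ts)).1
      = out ++ tailRepl suffix (fun k => PySem.Set.contains seen k || PySem.Set.contains ts k) := by
  intro suffix
  induction suffix with
  | nil => intro out ts _; simp [tailRepl]
  | cons e rest ih =>
      intro out ts H
      rw [List.foldl_cons]
      cases hk : pyEntryKey e with
      | none =>
          have hstep : upsertB_tail_step inc seen (out, ts) e = (out ++ [e], ts) := by
            unfold upsertB_tail_step
            rw [hk]
          rw [hstep, ih _ _ ?_, tailRepl_cons_none e rest _ hk,
            List.append_assoc, List.singleton_append]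
          intro k h1 h2
          rw [H k h1 h2, lastIncoming_cons_of_ne e rest k (by rw [hk]; intro hq; cases hq)]
      | some k =>
          by_cases hd : PySem.Set.contains seen k = false ∧ PySem.Set.contains ts k = false
          · have hstep : upsertB_tail_step inc seen (out, ts) e
                = (out ++ [(lastIncoming inc k).getD e], PySem.Set.add ts k) := by
              unfold upsertB_tail_step
              rw [hk]
              dsimp only
              rw [if_pos hd]
            have hdomv : (PySem.Set.contains seen k || PySem.Set.contains ts k) = false := by
              rw [hd.1, hd.2]
              rfl
            rw [hstep, ih _ _ ?_, tailRepl_cons_fresh e rest _ k hk hdomv, H k hd.1 hd.2]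
            · have hdom : (fun k' => PySem.Set.contains seen k'
                    || PySem.Set.contains (PySem.Set.add ts k) k')
                  = (fun k' => k' == k
                    || (PySem.Set.contains seen k' || PySem.Set.contains ts k')) := by
                funext k'
                rw [set_add_contains]
                cases PySem.Set.contains seen k' <;> cases PySem.Set.contains ts k' <;>
                  cases k' == k <;> rfl
              rw [hdom, List.append_assoc, List.singleton_append]
            · intro k' h1 h2
              rw [set_add_contains] at h2
              have hne : k' ≠ k := by
                intro hq
                rw [hq] at h2
                simp at h2
              have h3 : PySem.Set.contains ts k' = false := by
                cases hq : PySem.Set.contains ts k' with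
                | false => rfl
                | true => rw [hq] at h2; simp at h2
              rw [H k' h1 h3, lastIncoming_cons_of_ne e rest k' (by rw [hk]; simp [Ne.symm hne])]
          · have hstep : upsertB_tail_step inc seen (out, ts) e = (out, ts) := by
              unfold upsertB_tail_step
              rw [hk]
              dsimp only
              rw [if_neg hd]
            have hdomv : (PySem.Set.contains seen k || PySem.Set.contains ts k) = true := by
              cases hq1 : PySem.Set.contains seen k with
              | true => rfl
              | false =>
                  cases hq2 : PySem.Set.contains ts k with
                  | true => rfl
                  | false => exact absurd ⟨hq1, hq2⟩ hd
            rw [hstep, ih _ _ ?_, tailRepl_cons_mem e rest _ k hk hdomv]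
            intro k' h1 h2
            have hne : k' ≠ k := by
              intro hq
              subst hq
              exact hd ⟨h1, h2⟩
            rw [H k' h1 h2, lastIncoming_cons_of_ne e rest k' (by rw [hk]; simp [Ne.symm hne])]

-- ===== VERDICT (by name: the statement is the Claim_ definition above) =====
theorem upsert_manifest_entries_py_spec : Claim_equal_upsert_manifest_entries_py := by
  intro ex inc _
  unfold Spec_upsert_manifest_entries_py upsert_manifest_entries_py upsert_manifest_entries_py_alt
  have h0 : InvA [] PySem.Dict.empty :=
    ⟨by simp, fun s i hi => by simp [PySem.Dict.get?_empty] at hi,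
     fun s s' i hs _ => by simp [PySem.Dict.get?_empty] at hs⟩
  have hempty : ∀ k : String, PySem.Set.contains (PySem.Set.empty : PySem.Set String) k = false := by
    intro k
    cases hq : PySem.Set.contains (PySem.Set.empty : PySem.Set String) k with
    | false => rfl
    | true =>
        have := set_contains_true_mem _ _ hq
        simp [PySem.Set.empty] at this
  have hE := existChar (ex.getD []) (inc.getD []) [] PySem.Dict.empty [] PySem.Set.empty h0
    rfl (fun k => by rw [hempty k, PySem.Dict.contains_empty])
  obtain ⟨hInv, hout, hseen⟩ := hE
  rw [incChar (inc.getD []) _ _ hInv,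
    tailChar (inc.getD []) _ (inc.getD []) _ _ (fun k _ _ => rfl), hout]
  have hdom : (fun k =>
        PySem.Set.contains ((ex.getD []).foldl (upsertB_body_step (inc.getD [])) ([], PySem.Set.empty)).2 k
        || PySem.Set.contains (PySem.Set.empty : PySem.Set String) k)
      = (fun k => ((ex.getD []).foldl upsertA_exist_step ([], PySem.Dict.empty)).2.contains (some k)) := by
    funext k
    rw [hempty k, hseen k, Bool.or_false]
  rw [hdom]
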